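-- pv_equiv track=rewrite | github.com/alvisespano/perturb | dataset/python/notorious/find_duplicate.py | f
-- ===== SOURCE A (Python) =====
-- def f(A):
--     i = 0
--     length = len(A)
--     trovato = False
--     while i < length and not trovato:
--         j = i + 1
--         while j < length and not trovato:
--             if A[i] == A[j]:
--                 trovato = True
--             else:
--                 j = j + 1
--         if not trovato:
--             i = i + 1
--     if trovato:
--         return i
--     else:
--         return -1
-- ===== SOURCE B (Python) =====
-- def f(A):
--     seen = set()
--     ans = -1
--     for i, x in reversed(list(enumerate(A))):
--         if x in seen:
--             ans = i
--         seen.add(x)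
--     return ans
-- ===== Notes on version B (the rewrite author's own statement) =====
-- stated objective: faster
-- what changed: Replaced A's O(n^2) nested index loops (for each i, scan j>i for an equal value) by a single right-to-left pass over reversed(list(enumerate(A))) that maintains a hash set of values already seen to its right and keeps the smallest index whose value is in that set.
import Mathlib
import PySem

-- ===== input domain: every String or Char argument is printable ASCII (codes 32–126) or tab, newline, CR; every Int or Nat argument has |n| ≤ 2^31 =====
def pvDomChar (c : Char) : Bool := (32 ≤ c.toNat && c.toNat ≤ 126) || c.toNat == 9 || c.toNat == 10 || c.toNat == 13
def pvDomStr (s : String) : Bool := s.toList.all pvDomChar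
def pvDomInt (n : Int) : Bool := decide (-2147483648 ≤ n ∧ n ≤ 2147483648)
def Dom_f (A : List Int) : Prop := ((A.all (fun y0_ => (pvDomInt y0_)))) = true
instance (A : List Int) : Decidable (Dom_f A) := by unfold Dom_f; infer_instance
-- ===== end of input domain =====

-- B replaces A's quadratic nested index scan with a single right-to-left pass over
-- reversed(list(enumerate(A))) maintaining a set of values already seen (objective: faster).

-- ===== PORT A =====
-- inner while loop 'while j < length and not trovato'; both indices are always in range,
-- so pyGetD's default 0 is never the result
def fInner (A : List Int) (x : Int) (j : Int) : Bool :=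
  if j < (A.length : Int) then
    if PySem.List.pyGetD A j 0 = x then true
    else fInner A x (j + 1)
  else false
termination_by ((A.length : Int) - j).toNat
decreasing_by omega

-- outer while loop; 'trovato' becomes an early return of i
def fOuter (A : List Int) (i : Int) : Int :=
  if i < (A.length : Int) then
    if fInner A (PySem.List.pyGetD A i 0) (i + 1) then i
    else fOuter A (i + 1)
  else -1
termination_by ((A.length : Int) - i).toNat
decreasing_by omega

def f (A : List Int) : Int := fOuter A 0

-- ===== PORT B =====
def f_alt (A : List Int) : Int :=
  (((PySem.List.enumerate A 0).reverse).foldl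
    (fun st p =>
      (PySem.Set.add st.1 p.2, if PySem.Set.contains st.1 p.2 then p.1 else st.2))
    (PySem.Set.empty, -1)).2

-- ===== PRECONDITION & SPEC =====
def Spec_f (A : List Int) (out : Int) : Prop := out = f_alt A
instance (A : List Int) (out : Int) : Decidable (Spec_f A out) := by unfold Spec_f; infer_instance

-- ===== CLAIM (what is proved, stated in full; the proofs are below) =====
def Claim_equal_f : Prop := ∀ (A : List Int), Dom_f A → Spec_f A (f A)

-- ===== LEMMAS AND PROOFS =====

-- common specification: index of the first element with a later duplicate, else -1
def dupIdx : List Int → Int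
  | [] => -1
  | x :: xs => if x ∈ xs then 0 else (if dupIdx xs = -1 then -1 else dupIdx xs + 1)

lemma dupIdx_nonneg (xs : List Int) : dupIdx xs = -1 ∨ 0 ≤ dupIdx xs := by
  induction xs with
  | nil => left; rfl
  | cons x rest ih =>
    by_cases hm : x ∈ rest
    · right; simp [dupIdx, hm]
    · simp only [dupIdx, hm, if_false]
      rcases ih with h | h
      · left; simp [h]
      · by_cases hz : dupIdx rest = -1
        · left; simp [hz]
        · right; rw [if_neg hz]; omega

lemma fInner_eq (A : List Int) (x : Int) :
    ∀ (j : Nat), fInner A x (j : Int) = decide (x ∈ A.drop j) := by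
  have key : ∀ (n j : Nat), A.length - j ≤ n →
      fInner A x (j : Int) = decide (x ∈ A.drop j) := by
    intro n
    induction n with
    | zero =>
      intro j h
      unfold fInner
      rw [if_neg (by omega)]
      simp [List.drop_eq_nil_of_le (by omega : A.length ≤ j)]
    | succ n ih =>
      intro j h
      unfold fInner
      by_cases hj : (j : Int) < (A.length : Int)
      · rw [if_pos hj]
        have hjl : j < A.length := by exact_mod_cast hj
        have hd : A.drop j = A[j] :: A.drop (j + 1) := List.drop_eq_getElem_cons hjl
        rw [PySem.List.pyGetD_natCast]
        by_cases hx : A.getD j 0 = x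
        · rw [if_pos hx, hd]
          have : A[j] = x := by rwa [List.getD_eq_getElem A 0 hjl] at hx
          simp [this]
        · rw [if_neg hx]
          have hrec : fInner A x ((j : Int) + 1) = decide (x ∈ A.drop (j + 1)) := by
            have := ih (j + 1) (by omega)
            push_cast at this
            exact this
          rw [hrec, hd]
          have hne : A[j] ≠ x := by rwa [List.getD_eq_getElem A 0 hjl] at hx
          have hne' : ¬ (x = A[j]) := fun hh => hne hh.symm
          simp only [List.mem_cons, eq_false hne', false_or]
      · rw [if_neg hj]
        simp [List.drop_eq_nil_of_le (by omega : A.length ≤ j)]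
  intro j
  exact key (A.length - j) j le_rfl

lemma fOuter_eq (A : List Int) :
    ∀ (i : Nat), fOuter A (i : Int) =
      (if dupIdx (A.drop i) = -1 then -1 else dupIdx (A.drop i) + i) := by
  have key : ∀ (n i : Nat), A.length - i ≤ n →
      fOuter A (i : Int) =
        (if dupIdx (A.drop i) = -1 then -1 else dupIdx (A.drop i) + i) := by
    intro n
    induction n with
    | zero =>
      intro i h
      unfold fOuter
      rw [if_neg (by omega)]
      simp [List.drop_eq_nil_of_le (by omega : A.length ≤ i), dupIdx]
    | succ n ih =>
      intro i h
      unfold fOuter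
      by_cases hi : (i : Int) < (A.length : Int)
      · rw [if_pos hi]
        have hil : i < A.length := by exact_mod_cast hi
        have hd : A.drop i = A[i] :: A.drop (i + 1) := List.drop_eq_getElem_cons hil
        rw [PySem.List.pyGetD_natCast, List.getD_eq_getElem A 0 hil]
        have hinner : fInner A A[i] ((i : Int) + 1) = decide (A[i] ∈ A.drop (i + 1)) := by
          have := fInner_eq A A[i] (i + 1)
          push_cast at this
          exact this
        rw [hinner, hd]
        by_cases hmem : A[i] ∈ A.drop (i + 1)
        · simp [dupIdx, hmem]
        · have hrec := ih (i + 1) (by omega)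
          push_cast at hrec
          rw [if_neg (by simpa using hmem), hrec]
          simp only [dupIdx, hmem, if_false]
          rcases dupIdx_nonneg (A.drop (i + 1)) with hz | h0
          · simp [hz]
          · have hz : dupIdx (A.drop (i + 1)) ≠ -1 := by omega
            simp only [hz, if_false]
            rw [if_neg (show ¬(dupIdx (A.drop (i + 1)) + 1 = -1) by omega)]
            ring
      · rw [if_neg hi]
        simp [List.drop_eq_nil_of_le (by omega : A.length ≤ i), dupIdx]
  intro i
  exact key (A.length - i) i le_rfl

lemma falt_fold_eq (xs : List Int) :
    ∀ (s : Nat),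
      (PySem.List.enumerate xs (s : Int)).foldr
        (fun p st =>
          (PySem.Set.add st.1 p.2, if PySem.Set.contains st.1 p.2 then p.1 else st.2))
        (PySem.Set.empty, -1)
      = (PySem.Set.ofList xs.reverse,
         if dupIdx xs = -1 then -1 else dupIdx xs + s) := by
  induction xs with
  | nil => intro s; simp [PySem.List.enumerate_nil, dupIdx, PySem.Set.ofList, PySem.Set.empty]
  | cons x rest ih =>
    intro s
    rw [PySem.List.enumerate_cons]
    have ih' := ih (s + 1)
    push_cast at ih'
    simp only [List.foldr_cons, ih']
    simp only [Prod.mk.injEq]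
    constructor
    · rw [List.reverse_cons, PySem.Set.ofList_append_singleton]
    · have hcont : PySem.Set.contains (PySem.Set.ofList rest.reverse) x = decide (x ∈ rest) := by
        by_cases hm : x ∈ rest
        · simp [hm]
        · have hnm : x ∉ PySem.Set.ofList rest.reverse := fun hc =>
            hm (List.mem_reverse.mp ((PySem.Set.mem_ofList _ _).mp hc))
          simp only [hm, decide_false]
          exact Bool.eq_false_iff.mpr (fun hc => hnm ((PySem.Set.contains_iff _ _).mp hc))
      rw [hcont]
      by_cases hm : x ∈ rest
      · simp [dupIdx, hm]
      · simp only [hm, decide_false]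
        simp only [dupIdx, hm, if_false]
        rcases dupIdx_nonneg rest with hz | h0
        · simp [hz]
        · have hz : dupIdx rest ≠ -1 := by omega
          simp only [hz, if_false]
          rw [if_neg (show ¬(dupIdx rest + 1 = -1) by omega)]
          push_cast
          ring

lemma f_eq_dupIdx (A : List Int) :
    f A = (if dupIdx A = -1 then -1 else dupIdx A) := by
  have := fOuter_eq A 0
  simpa [f] using this

lemma f_alt_eq_dupIdx (A : List Int) :
    f_alt A = (if dupIdx A = -1 then -1 else dupIdx A) := by
  have h := falt_fold_eq A 0
  unfold f_alt
  rw [List.foldl_reverse]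
  push_cast at h
  rw [h]
  simp

-- ===== VERDICT (by name: the statement is the Claim_ definition above) =====
theorem f_spec : Claim_equal_f := by
  intro A _
  unfold Spec_f
  rw [f_eq_dupIdx, f_alt_eq_dupIdx]
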